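-- pv_equiv track=rewrite | github.com/MariaDanB-Sistem-Basis-Data/Query-Optimizer | helper/helper.py | _some_permutations
-- ===== SOURCE A (Python) =====
-- def _some_permutations(items, max_count=5):
--     res = []
--     used = [False]*len(items)
--     cur = []
--     def bt():
--         if len(cur) == len(items):
--             res.append(cur[:])
--             return
--         if len(res) >= max_count: return
--         for i in range(len(items)):
--             if not used[i]:
--                 used[i] = True
--                 cur.append(items[i])
--                 bt()
--                 cur.pop()
--                 used[i] = False
--     bt()
--     return res if res else [items]
-- ===== SOURCE B (Python) =====
-- from itertools import permutations, islice
--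
--
-- def _some_permutations(items, max_count=5):
--     res = [list(p) for p in islice(permutations(items), max(max_count, 0))]
--     return res if res else [items]
-- ===== Notes on version B (the rewrite author's own statement) =====
-- stated objective: simpler
-- what changed: Replaced the hand-written backtracking (used-array, mutable cur stack, nested recursive bt() with pruning) by lazily slicing itertools.permutations with islice(., max(max_count,0)), keeping the same 'res if res else [items]' tail.
import Mathlib
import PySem

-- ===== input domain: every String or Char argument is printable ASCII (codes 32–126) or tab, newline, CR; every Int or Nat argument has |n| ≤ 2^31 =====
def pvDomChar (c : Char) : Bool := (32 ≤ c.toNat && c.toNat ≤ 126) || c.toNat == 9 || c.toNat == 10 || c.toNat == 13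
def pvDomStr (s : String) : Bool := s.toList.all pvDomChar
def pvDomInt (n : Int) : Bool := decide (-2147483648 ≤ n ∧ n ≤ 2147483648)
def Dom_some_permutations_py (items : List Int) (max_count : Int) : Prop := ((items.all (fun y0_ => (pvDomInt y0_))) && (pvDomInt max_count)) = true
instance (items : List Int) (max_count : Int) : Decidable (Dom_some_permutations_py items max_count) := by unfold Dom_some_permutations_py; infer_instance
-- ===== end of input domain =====

-- B replaces A's hand-written backtracking (used-array + mutable cur stack + pruned recursion)
-- by the standard lazy enumeration of permutations in index order, sliced to max(max_count,0);
-- objective: simpler (a timing run also measured B faster).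

-- ===== PORT A =====
-- bt(): the nested backtracking function of A, with its mutable state threaded through
-- (res is the accumulator; used/cur are restored by A after each loop step, so they are
-- plain arguments here). fuel = recursion depth bound, items.length + 1 at the top call,
-- never exhausted.
def btA (items : List Int) (max_count : Int) :
    Nat → List Bool → List Int → List (List Int) → List (List Int)
  | 0, _, _, res => res
  | fuel + 1, used, cur, res =>
    if cur.length = items.length then res ++ [cur]
    else if (res.length : Int) ≥ max_count then res
    else (List.range items.length).foldl (fun r i =>
        if used.getD i false = false then
          btA items max_count fuel (used.set i true) (cur ++ [items.getD i 0]) r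
        else r) res

def some_permutations_py (items : List Int) (max_count : Int) : List (List Int) :=
  let res := btA items max_count (items.length + 1) (List.replicate items.length false) [] []
  if res = [] then [items] else res

-- ===== PORT B =====
-- itertools.permutations(l): permutations in index order — at each level pick the element at
-- each index in turn and recurse on the list with that index removed. fuel = l.length.
def permsB : Nat → List Int → List (List Int)
  | 0, _ => [[]]
  | fuel + 1, l => (List.range l.length).flatMap (fun i =>
      (permsB fuel (l.eraseIdx i)).map (fun p => l.getD i 0 :: p))

def some_permutations_py_alt (items : List Int) (max_count : Int) : List (List Int) :=
  let res := (permsB items.length items).take (max max_count 0).toNat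
  if res = [] then [items] else res

-- ===== PRECONDITION & SPEC =====
def Spec_some_permutations_py (items : List Int) (max_count : Int) (out : List (List Int)) : Prop := out = some_permutations_py_alt items max_count
instance (items : List Int) (max_count : Int) (out : List (List Int)) : Decidable (Spec_some_permutations_py items max_count out) := by unfold Spec_some_permutations_py; infer_instance

-- ===== CLAIM (what is proved, stated in full; the proofs are below) =====
def Claim_equal_some_permutations_py : Prop := ∀ (items : List Int) (max_count : Int), Dom_some_permutations_py items max_count → Spec_some_permutations_py items max_count (some_permutations_py items max_count)

-- ===== LEMMAS AND PROOFS =====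

-- the items at the still-unused positions, in order
def select : List Int → List Bool → List Int
  | x :: xs, b :: bs => if b then select xs bs else x :: select xs bs
  | _, _ => []

lemma select_length : ∀ (items : List Int) (used : List Bool),
    used.length = items.length → (select items used).length = used.count false := by
  intro items
  induction items with
  | nil => intro used h; cases used <;> simp_all [select]
  | cons x xs ih =>
    intro used h
    cases used with
    | nil => simp at h
    | cons b bs =>
      simp only [List.length_cons, Nat.succ.injEq] at h
      cases b <;> simp [select, ih bs h]


lemma select_replicate : ∀ (items : List Int),
    select items (List.replicate items.length false) = items := by
  intro items
  induction items with
  | nil => simp [select]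
  | cons x xs ih => simpa [select, List.replicate_succ] using ih


lemma select_getD : ∀ (items : List Int) (used : List Bool) (i : Nat),
    used.length = items.length → i < items.length → used.getD i false = false →
    (select items used).getD ((used.take i).count false) 0 = items.getD i 0 := by
  intro items
  induction items with
  | nil => intro used i _ h2; simp at h2
  | cons x xs ih =>
    intro used i h1 h2 h3
    cases used with
    | nil => simp at h1
    | cons b bs =>
      simp only [List.length_cons, Nat.succ.injEq] at h1
      cases i with
      | zero =>
        simp only [List.getD, List.getElem?_cons_zero, Option.getD_some] at h3 ⊢
        subst h3
        simp [select]
      | succ j =>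
        simp only [List.length_cons, Nat.succ_lt_succ_iff] at h2
        have h3' : bs.getD j false = false := by simpa [List.getD] using h3
        cases b with
        | true =>
          simpa [select, List.take_succ_cons, List.count_cons] using ih bs j h1 h2 h3'
        | false =>
          have := ih bs j h1 h2 h3'
          simp only [select, if_neg Bool.false_ne_true, List.take_succ_cons,
            List.count_cons]
          simpa [List.getD, Nat.add_comm] using this


lemma select_set : ∀ (items : List Int) (used : List Bool) (i : Nat),
    used.length = items.length → i < items.length → used.getD i false = false →
    select items (used.set i true) = (select items used).eraseIdx ((used.take i).count false) := by
  intro items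
  induction items with
  | nil => intro used i _ h2; simp at h2
  | cons x xs ih =>
    intro used i h1 h2 h3
    cases used with
    | nil => simp at h1
    | cons b bs =>
      simp only [List.length_cons, Nat.succ.injEq] at h1
      cases i with
      | zero =>
        simp only [List.getD, List.getElem?_cons_zero, Option.getD_some] at h3
        subst h3
        simp [select, List.set]
      | succ j =>
        simp only [List.length_cons, Nat.succ_lt_succ_iff] at h2
        have h3' : bs.getD j false = false := by simpa [List.getD] using h3
        have := ih bs j h1 h2 h3'
        cases b with
        | true =>
          simpa [select, List.set, List.take_succ_cons] using this
        | false =>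
          simp [select, List.set, List.take_succ_cons, this]


lemma rank_lt_count : ∀ (used : List Bool) (i : Nat),
    i < used.length → used.getD i false = false →
    (used.take i).count false < used.count false := by
  intro used i h1 h2
  have hg : used[i] = false := by
    rw [List.getD_eq_getElem] at h2 <;> assumption
  conv_rhs => rw [← List.take_append_drop i used]
  rw [List.count_append, List.drop_eq_getElem_cons h1, hg, List.count_cons]
  simp


lemma count_take_succ : ∀ (used : List Bool) (i : Nat), i < used.length →
    (used.take (i + 1)).count false
      = (used.take i).count false + (if used.getD i false then 0 else 1) := by
  intro used i h1
  rw [List.take_add_one, List.getElem?_eq_getElem h1, List.count_append,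
    List.getD_eq_getElem used false h1]
  cases h : used[i] <;> simp

lemma count_drop_cons : ∀ (used : List Bool) (i : Nat), i < used.length →
    (used.drop i).count false
      = (if used.getD i false then 0 else 1) + (used.drop (i + 1)).count false := by
  intro used i h1
  rw [List.drop_eq_getElem_cons h1, List.count_cons, List.getD_eq_getElem used false h1]
  cases h : used[i] <;> simp [Nat.add_comm]

lemma count_set : ∀ (items : List Int) (used : List Bool) (i : Nat),
    used.length = items.length → i < items.length → used.getD i false = false →
    (used.set i true).count false = used.count false - 1 := by
  intro items used i h1 h2 h3
  have h4 := select_length items (used.set i true) (by simpa using h1)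
  rw [select_set items used i h1 h2 h3, List.length_eraseIdx,
    select_length items used h1] at h4
  have h5 := rank_lt_count used i (by omega) h3
  split at h4 <;> omega

lemma count_take_drop (used : List Bool) (i : Nat) :
    used.count false = (used.take i).count false + (used.drop i).count false := by
  conv_lhs => rw [← List.take_append_drop i used]
  rw [List.count_append]

lemma loop_bt (items : List Int) (mc : Int) (fuel k' : Nat)
    (IH : ∀ (used : List Bool) (cur : List Int) (res : List (List Int)),
      used.length = items.length → used.count false = k' →
      cur.length + k' = items.length → k' < fuel → (res.length : Int) < mc →
      btA items mc fuel used cur res =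
        res ++ ((permsB k' (select items used)).map (fun p => cur ++ p)).take
          (mc - res.length).toNat)
    (used : List Bool) (cur : List Int)
    (hul : used.length = items.length) (hk : used.count false = k' + 1)
    (hcur : cur.length + (k' + 1) = items.length) (hfuel : k' < fuel) :
    ∀ (m i : Nat) (r : List (List Int)), i + m = items.length →
    (r.length : Int) ≤ mc →
    (k' = 0 → 1 ≤ ((used.drop i).count false) → (r.length : Int) < mc) →
    (List.range' i m).foldl (fun r i =>
        if used.getD i false = false then
          btA items mc fuel (used.set i true) (cur ++ [items.getD i 0]) r
        else r) r
    = r ++ ((List.range' ((used.take i).count false)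
          (k' + 1 - (used.take i).count false)).flatMap
        (fun j => (permsB k' ((select items used).eraseIdx j)).map
          (fun p => cur ++ (select items used).getD j 0 :: p))).take
        (mc - r.length).toNat := by
  intro m
  induction m with
  | zero =>
    intro i r him _ _
    have hti : used.take i = used := List.take_of_length_le (by omega)
    rw [hti, hk, Nat.sub_self]
    simp
  | succ m ihm =>
    intro i r him hr2 hr3
    have hi : i < items.length := by omega
    have hiu : i < used.length := by omega
    rw [List.range'_succ, List.foldl_cons]
    by_cases h : used.getD i false = false
    · -- unused position: one backtracking step
      have hflt : (used.take i).count false < k' + 1 := by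
        have := rank_lt_count used i hiu h
        omega
      have hrsucc : (used.take (i + 1)).count false = (used.take i).count false + 1 := by
        rw [count_take_succ used i hiu, h]
        simp
      by_cases hlt : (r.length : Int) < mc
      · -- still collecting: the recursive call emits a block of permutations
        rw [if_pos h, IH (used.set i true) (cur ++ [items.getD i 0]) r
          (by simpa using hul)
          (by have := count_set items used i hul hi h; omega)
          (by simp; omega) hfuel hlt]
        rw [select_set items used i hul hi h,
          ← select_getD items used i hul hi h]
        have hfun : (fun p => (cur ++ [(select items used).getD ((used.take i).count false) 0]) ++ p)
            = (fun p => cur ++ (select items used).getD ((used.take i).count false) 0 :: p) := by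
          funext p; simp
        rw [hfun]
        set s := select items used with hs
        set a := (used.take i).count false with ha
        set A := (permsB k' (s.eraseIdx a)).map
          (fun p => cur ++ s.getD a 0 :: p) with hA
        set t := (mc - r.length).toNat with ht
        have hlen1 : ((r ++ A.take t).length : Int) ≤ mc := by
          simp [List.length_take]
          omega
        rw [ihm (i + 1) (r ++ A.take t) (by omega) hlen1 ?side]
        case side =>
          intro hk0 hge
          exfalso
          have hcd := count_take_drop used (i + 1)
          rw [hrsucc] at hcd
          omega
        rw [hrsucc]
        have hsplit : k' + 1 - a = (k' - a) + 1 := by omega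
        rw [hsplit, List.range'_succ, List.flatMap_cons, List.take_append]
        have harith : (mc - ((r ++ A.take t).length : Int)).toNat = t - A.length := by
          simp [List.length_take]
          omega
        rw [harith]
        have : k' + 1 - (a + 1) = k' - a := by omega
        rw [this, List.append_assoc]
      · -- res is full: the recursive call prunes immediately
        have heq : (r.length : Int) = mc := le_antisymm hr2 (by omega)
        have hk0 : k' ≠ 0 := by
          intro hk0
          have hd := count_drop_cons used i hiu
          rw [h] at hd
          simp at hd
          exact absurd (hr3 hk0 (by omega)) hlt
        obtain ⟨f, rfl⟩ : ∃ f, fuel = f + 1 := ⟨fuel - 1, by omega⟩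
        rw [if_pos h]
        have hprune : btA items mc (f + 1) (used.set i true) (cur ++ [items.getD i 0]) r = r := by
          rw [btA]
          rw [if_neg (by simp only [List.length_append, List.length_cons,
            List.length_nil]; omega), if_pos (by omega)]
        rw [hprune, ihm (i + 1) r (by omega) hr2 (fun c => absurd c hk0)]
        have ht0 : (mc - (r.length : Int)).toNat = 0 := by omega
        simp [ht0]
    · -- already-used position: skipped on both sides
      rw [if_neg h]
      have h' : used.getD i false = true := by
        revert h
        cases used.getD i false <;> simp
      have hrsame : (used.take (i + 1)).count false = (used.take i).count false := by
        rw [count_take_succ used i hiu, h']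
        simp
      have hdsame : (used.drop (i + 1)).count false = (used.drop i).count false := by
        have := count_drop_cons used i hiu
        rw [h'] at this
        simp at this
        omega
      rw [ihm (i + 1) r (by omega) hr2 (fun c hge => hr3 c (by omega)), hrsame]

lemma main_bt (items : List Int) (mc : Int) :
    ∀ (k fuel : Nat) (used : List Bool) (cur : List Int) (res : List (List Int)),
    used.length = items.length → used.count false = k →
    cur.length + k = items.length → k < fuel → (res.length : Int) < mc →
    btA items mc fuel used cur res =
      res ++ ((permsB k (select items used)).map (fun p => cur ++ p)).take
        (mc - res.length).toNat := by
  intro k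
  induction k with
  | zero =>
    intro fuel used cur res hul hk hcur hfuel hres
    obtain ⟨f, rfl⟩ : ∃ f, fuel = f + 1 := ⟨fuel - 1, by omega⟩
    rw [btA, if_pos (by omega)]
    have ht : ∃ t, (mc - (res.length : Int)).toNat = t + 1 :=
      ⟨(mc - (res.length : Int)).toNat - 1, by omega⟩
    obtain ⟨t, ht⟩ := ht
    simp [permsB, ht]
  | succ k' ihk =>
    intro fuel used cur res hul hk hcur hfuel hres
    obtain ⟨f, rfl⟩ : ∃ f, fuel = f + 1 := ⟨fuel - 1, by omega⟩
    rw [btA, if_neg (by omega), if_neg (by omega), List.range_eq_range']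
    rw [loop_bt items mc f k' (fun u c rs h1 h2 h3 h4 h5 => ihk f u c rs h1 h2 h3 h4 h5)
      used cur hul hk hcur (by omega) items.length 0 res (by omega) (le_of_lt hres)
      (fun _ _ => hres)]
    simp only [List.take_zero, List.count_nil]
    rw [permsB, select_length items used hul, hk, List.range_eq_range', List.map_flatMap]
    have : ∀ j, ((permsB k' ((select items used).eraseIdx j)).map
          (fun p => (select items used).getD j 0 :: p)).map (fun p => cur ++ p)
        = (permsB k' ((select items used).eraseIdx j)).map
          (fun p => cur ++ (select items used).getD j 0 :: p) := by
      intro j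
      rw [List.map_map]
      rfl
    simp only [this, Nat.sub_zero]

-- ===== VERDICT (by name: the statement is the Claim_ definition above) =====
theorem some_permutations_py_spec : Claim_equal_some_permutations_py := by
  intro items mc _
  unfold Spec_some_permutations_py some_permutations_py some_permutations_py_alt
  by_cases hmc : 1 ≤ mc
  · have hmax : max mc 0 = mc := by omega
    have hmain := main_bt items mc items.length (items.length + 1)
      (List.replicate items.length false) [] []
      (by simp) (by simp) (by simp) (by omega)
      (by simp only [List.length_nil, Nat.cast_zero]; omega)
    rw [select_replicate] at hmain
    simp only [List.length_nil, Nat.cast_zero, Int.sub_zero, List.nil_append] at hmain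
    rw [hmain, hmax]
    simp
  · have hmax : (max mc 0).toNat = 0 := by omega
    rw [hmax]
    simp only [List.take_zero]
    cases items with
    | nil => simp [btA]
    | cons x xs =>
      have hempty : btA (x :: xs) mc ((x :: xs).length + 1)
          (List.replicate (x :: xs).length false) [] [] = [] := by
        rw [btA]
        simp only [List.length_nil, List.length_cons, Nat.cast_zero]
        rw [if_neg (by omega), if_pos (by omega)]
      simp only [List.length_cons] at hempty
      simp [hempty]
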